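-- pv_equiv track=rewrite | github.com/TmajidT/python-Snake-and-Ladder | play_time.py | get_player_location
-- ===== SOURCE A (Python) =====
-- def get_player_location(player_location,dice_number,main_boardX,main_boardY):
--
--     #if player is on the edge
--     if (player_location[4] == 1) and (player_location[1] == main_boardY - 1) and (dice_number > 0):
--         dice_number -= 1
--         player_location[3] += 1
--         player_location[0] -= 1
--         player_location[4] = 0
--     elif (player_location[4] == 1) and (player_location[1] == 0) and (dice_number > 0) and (player_location[3] != 0):
--         dice_number -= 1
--         player_location[3] += 1
--         player_location[0] -= 1
--         player_location[4] = 0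
--
--
--     if(player_location[3] % 2 == 0) and (dice_number > 0):
--         for j in range(0,dice_number):
--             player_location[1] += 1
--             dice_number -= 1
--             if(player_location[1] >= main_boardY - 1):
--                 player_location[4] = 1
--                 get_player_location(player_location,dice_number,main_boardX,main_boardY)
--                 break
--     elif (player_location[3] % 2 != 0) and (dice_number > 0):
--         for j in range(0,dice_number):
--             player_location[1] -= 1
--             dice_number -= 1
--             if(player_location[1] <= 0):
--                 player_location[4] = 1
--                 get_player_location(player_location,dice_number,main_boardX,main_boardY)
--                 break
--
--     return player_location
-- ===== SOURCE B (Python) =====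
-- def get_player_location(player_location, dice_number, main_boardX, main_boardY):
--     # Iterative re-implementation: one while-loop over scalar state instead of
--     # tail recursion with in-place list mutation; same net mutation, same return.
--     x0 = player_location[0]
--     x1 = player_location[1]
--     x3 = player_location[3]
--     x4 = player_location[4]
--     d = dice_number
--     while True:
--         if x4 == 1 and d > 0 and (x1 == main_boardY - 1 or (x1 == 0 and x3 != 0)):
--             d -= 1
--             x3 += 1
--             x0 -= 1
--             x4 = 0
--         if d <= 0:
--             break
--         step = 1 if x3 % 2 == 0 else -1
--         hit = False
--         while d > 0:
--             x1 += step
--             d -= 1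
--             if (step == 1 and x1 >= main_boardY - 1) or (step == -1 and x1 <= 0):
--                 x4 = 1
--                 hit = True
--                 break
--         if not hit:
--             break
--     player_location[0] = x0
--     player_location[1] = x1
--     player_location[3] = x3
--     player_location[4] = x4
--     return player_location
-- ===== Notes on version B (the rewrite author's own statement) =====
-- stated objective: alternative
-- what changed: Replaced A's tail recursion with in-place list mutation by a single iterative while-loop over four scalar state variables (position written back once at the end), with A's two identical edge elif-branches merged into one condition and the two parity-specific for-loops merged into one directional stepping loop parameterised by a +1/-1 step.
-- outside the precondition, e.g. on get_player_location([0, 0, 0], 3, 5, 5): A raises IndexError, B raises IndexError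
import Mathlib
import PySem

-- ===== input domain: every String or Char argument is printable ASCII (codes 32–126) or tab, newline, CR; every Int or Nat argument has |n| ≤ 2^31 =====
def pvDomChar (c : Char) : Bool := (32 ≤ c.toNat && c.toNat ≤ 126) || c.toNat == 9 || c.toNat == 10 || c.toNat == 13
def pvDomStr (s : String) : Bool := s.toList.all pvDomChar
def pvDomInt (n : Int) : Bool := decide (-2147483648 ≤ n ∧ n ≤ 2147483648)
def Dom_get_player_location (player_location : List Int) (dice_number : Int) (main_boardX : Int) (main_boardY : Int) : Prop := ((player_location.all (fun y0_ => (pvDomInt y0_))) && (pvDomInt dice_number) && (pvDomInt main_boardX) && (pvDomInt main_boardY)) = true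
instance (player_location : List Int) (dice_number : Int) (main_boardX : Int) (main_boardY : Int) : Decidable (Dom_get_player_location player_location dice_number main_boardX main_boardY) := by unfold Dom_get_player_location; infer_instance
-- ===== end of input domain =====

-- B replaces A's tail recursion (with in-place list mutation) by one iterative while-loop
-- over four scalar state variables written back once; return value AND net mutation agree.
-- Both Pythons mutate player_location in place; the Lean ports model the list functionally.

-- ===== PORT A =====
-- A's recursion is modelled with a fuel parameter (dice_number.toNat + 1); every recursive
-- call of the Python strictly decreases dice_number, so the fuel never runs out on inputs
-- where dice matter (at fuel 0, dice ≤ 0 and the Python does nothing either).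
mutual
-- the leading 'if player is on the edge' if/elif block of A (same branch order)
def pvAEdge (pl : List Int) (dice Y : Int) : List Int × Int :=
  if PySem.List.pyGetD pl 4 0 = 1 ∧ PySem.List.pyGetD pl 1 0 = Y - 1 ∧ dice > 0 then
    ((((pl.set 3 (PySem.List.pyGetD pl 3 0 + 1)).set 0 (PySem.List.pyGetD pl 0 0 - 1)).set 4 0), dice - 1)
  else if PySem.List.pyGetD pl 4 0 = 1 ∧ PySem.List.pyGetD pl 1 0 = 0 ∧ dice > 0 ∧ PySem.List.pyGetD pl 3 0 ≠ 0 then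
    ((((pl.set 3 (PySem.List.pyGetD pl 3 0 + 1)).set 0 (PySem.List.pyGetD pl 0 0 - 1)).set 4 0), dice - 1)
  else (pl, dice)

-- the body of get_player_location: edge block, then one of the two directional for-loops
def pvAGo (fuel : Nat) (pl : List Int) (dice : Int) (X Y : Int) : List Int :=
  match fuel with
  | 0 => pl
  | f+1 =>
    let p := pvAEdge pl dice Y
    let pl' := p.1
    let dice' := p.2
    if PySem.Int.mod (PySem.List.pyGetD pl' 3 0) 2 = 0 ∧ dice' > 0 then
      pvAUp f pl' dice' dice'.toNat X Y
    else if PySem.Int.mod (PySem.List.pyGetD pl' 3 0) 2 ≠ 0 ∧ dice' > 0 then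
      pvADown f pl' dice' dice'.toNat X Y
    else pl'
termination_by (fuel, 0)
decreasing_by all_goals (apply Prod.Lex.left; omega)
-- 'for j in range(0, dice_number)' of the even-row branch (cnt = remaining iterations)
def pvAUp (f : Nat) (pl : List Int) (dice : Int) (cnt : Nat) (X Y : Int) : List Int :=
  match cnt with
  | 0 => pl
  | c+1 =>
    let pl' := pl.set 1 (PySem.List.pyGetD pl 1 0 + 1)
    let dice' := dice - 1
    if PySem.List.pyGetD pl' 1 0 ≥ Y - 1 then
      pvAGo f (pl'.set 4 1) dice' X Y
    else pvAUp f pl' dice' c X Y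
termination_by (f, cnt + 1)
decreasing_by all_goals (first | (apply Prod.Lex.left; omega) | (apply Prod.Lex.right; omega))
-- 'for j in range(0, dice_number)' of the odd-row branch
def pvADown (f : Nat) (pl : List Int) (dice : Int) (cnt : Nat) (X Y : Int) : List Int :=
  match cnt with
  | 0 => pl
  | c+1 =>
    let pl' := pl.set 1 (PySem.List.pyGetD pl 1 0 - 1)
    let dice' := dice - 1
    if PySem.List.pyGetD pl' 1 0 ≤ 0 then
      pvAGo f (pl'.set 4 1) dice' X Y
    else pvADown f pl' dice' c X Y
termination_by (f, cnt + 1)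
decreasing_by all_goals (first | (apply Prod.Lex.left; omega) | (apply Prod.Lex.right; omega))
end

def get_player_location (player_location : List Int) (dice_number : Int) (main_boardX : Int) (main_boardY : Int) : List Int :=
  pvAGo (dice_number.toNat + 1) player_location dice_number main_boardX main_boardY

-- ===== PORT B =====
-- inner 'while d > 0' stepping loop of Source B; fuel = d.toNat (the loop runs at most that often);
-- returns (x1, d, hit)
def pvBStep (fuel : Nat) (step x1 d Y : Int) : Int × Int × Bool :=
  match fuel with
  | 0 => (x1, d, false)
  | f+1 =>
    if d > 0 then
      let x1' := x1 + step
      let d' := d - 1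
      if (step = 1 ∧ x1' ≥ Y - 1) ∨ (step = -1 ∧ x1' ≤ 0) then (x1', d', true)
      else pvBStep f step x1' d' Y
    else (x1, d, false)

-- the merged single edge condition at the top of Source B's while-loop; returns (x0, x3, x4, d)
def pvBEdge (x0 x1 x3 x4 d Y : Int) : Int × Int × Int × Int :=
  if x4 = 1 ∧ d > 0 ∧ (x1 = Y - 1 ∨ (x1 = 0 ∧ x3 ≠ 0)) then (x0 - 1, x3 + 1, (0:Int), d - 1)
  else (x0, x3, x4, d)

-- outer 'while True' loop of Source B over the scalar state (x0, x1, x3, x4, d); fuel as in A's port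
def pvBOuter (fuel : Nat) (x0 x1 x3 x4 d X Y : Int) : Int × Int × Int × Int :=
  match fuel with
  | 0 => (x0, x1, x3, x4)
  | f+1 =>
    let q := pvBEdge x0 x1 x3 x4 d Y
    let x0' := q.1; let x3' := q.2.1; let x4' := q.2.2.1; let d' := q.2.2.2
    if d' ≤ 0 then (x0', x1, x3', x4')
    else
      let step : Int := if PySem.Int.mod x3' 2 = 0 then 1 else -1
      match pvBStep d'.toNat step x1 d' Y with
      | (x1', d'', true) => pvBOuter f x0' x1' x3' 1 d'' X Y
      | (x1', _, false) => (x0', x1', x3', x4')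

def get_player_location_alt (player_location : List Int) (dice_number : Int) (main_boardX : Int) (main_boardY : Int) : List Int :=
  let x0 := PySem.List.pyGetD player_location 0 0
  let x1 := PySem.List.pyGetD player_location 1 0
  let x3 := PySem.List.pyGetD player_location 3 0
  let x4 := PySem.List.pyGetD player_location 4 0
  match pvBOuter (dice_number.toNat + 1) x0 x1 x3 x4 dice_number main_boardX main_boardY with
  | (y0, y1, y3, y4) => (((player_location.set 0 y0).set 1 y1).set 3 y3).set 4 y4

-- ===== PRECONDITION & SPEC =====
-- Pre_ excludes only lists with fewer than 5 elements, on which Python A raises IndexError.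
def Pre_get_player_location (player_location : List Int) (dice_number : Int) (main_boardX : Int) (main_boardY : Int) : Prop :=
  5 ≤ player_location.length
instance (player_location : List Int) (dice_number : Int) (main_boardX : Int) (main_boardY : Int) : Decidable (Pre_get_player_location player_location dice_number main_boardX main_boardY) := by unfold Pre_get_player_location; infer_instance

def pvWitness_get_player_location : List Int × Int × Int × Int := ([0, 0, 0, 0, 0], 7, 5, 5)

def Spec_get_player_location (player_location : List Int) (dice_number : Int) (main_boardX : Int) (main_boardY : Int) (out : List Int) : Prop := out = get_player_location_alt player_location dice_number main_boardX main_boardY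
instance (player_location : List Int) (dice_number : Int) (main_boardX : Int) (main_boardY : Int) (out : List Int) : Decidable (Spec_get_player_location player_location dice_number main_boardX main_boardY out) := by unfold Spec_get_player_location; infer_instance

-- ===== CLAIM (what is proved, stated in full; the proofs are below) =====
def Claim_equal_get_player_location : Prop := ∀ (player_location : List Int) (dice_number : Int) (main_boardX : Int) (main_boardY : Int), Dom_get_player_location player_location dice_number main_boardX main_boardY → Pre_get_player_location player_location dice_number main_boardX main_boardY → Spec_get_player_location player_location dice_number main_boardX main_boardY (get_player_location player_location dice_number main_boardX main_boardY)

-- ===== LEMMAS AND PROOFS =====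

-- inner-loop correspondence, even rows: A's counted for-loop over the list equals B's
-- d-guarded while over the scalar, when the loop counter equals the remaining dice
theorem pvUpEq (c : Nat) : ∀ (f : Nat) (a b c3 e4 e5 : Int) (t : List Int) (X Y : Int),
    pvAUp f (a :: b :: c3 :: e4 :: e5 :: t) ((c : Nat) : Int) c X Y =
      (match pvBStep c 1 b ((c : Nat) : Int) Y with
       | (x1', d', true) => pvAGo f ((a :: x1' :: c3 :: e4 :: e5 :: t).set 4 1) d' X Y
       | (x1', _, false) => a :: x1' :: c3 :: e4 :: e5 :: t) := by
  induction c with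
  | zero => intro f a b c3 e4 e5 t X Y; simp [pvAUp, pvBStep]
  | succ c ih =>
    intro f a b c3 e4 e5 t X Y
    have hd : ((c + 1 : Nat) : Int) - 1 = ((c : Nat) : Int) := by push_cast; ring
    have he1 : ((1:Int) = 1) ↔ True := by norm_num
    have he2 : ((1:Int) = -1) ↔ False := by norm_num
    simp only [pvAUp, pvBStep, pysem, List.getD_cons_zero, List.getD_cons_succ, List.set, hd,
      he2, true_and, false_and, or_false]
    split_ifs with h1 h2 h3 <;>
      first
        | rfl
        | (exfalso; omega)
        | (exact ih f a (b + 1) c3 e4 e5 t X Y)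

-- inner-loop correspondence, odd rows
theorem pvDownEq (c : Nat) : ∀ (f : Nat) (a b c3 e4 e5 : Int) (t : List Int) (X Y : Int),
    pvADown f (a :: b :: c3 :: e4 :: e5 :: t) ((c : Nat) : Int) c X Y =
      (match pvBStep c (-1) b ((c : Nat) : Int) Y with
       | (x1', d', true) => pvAGo f ((a :: x1' :: c3 :: e4 :: e5 :: t).set 4 1) d' X Y
       | (x1', _, false) => a :: x1' :: c3 :: e4 :: e5 :: t) := by
  induction c with
  | zero => intro f a b c3 e4 e5 t X Y; simp [pvADown, pvBStep]
  | succ c ih =>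
    intro f a b c3 e4 e5 t X Y
    have hd : ((c + 1 : Nat) : Int) - 1 = ((c : Nat) : Int) := by push_cast; ring
    have hs : b + -1 = b - 1 := by ring
    have he1 : ((-1:Int) = 1) ↔ False := by norm_num
    have he2 : ((-1:Int) = -1) ↔ True := by norm_num
    simp only [pvADown, pvBStep, pysem, List.getD_cons_zero, List.getD_cons_succ, List.set, hd, hs,
      he1, true_and, false_and, false_or]
    split_ifs with h1 h2 h3 <;>
      first
        | rfl
        | (exfalso; omega)
        | (exact ih f a (b - 1) c3 e4 e5 t X Y)

-- shared tail: A's parity dispatch after the edge block equals B's single stepping loop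
theorem pvTail (f : Nat)
    (ih : ∀ (a b c3 e4 e5 : Int) (t : List Int) (d X Y : Int),
        pvAGo f (a :: b :: c3 :: e4 :: e5 :: t) d X Y =
          match pvBOuter f a b e4 e5 d X Y with
          | (y0, y1, y3, y4) => y0 :: y1 :: c3 :: y3 :: y4 :: t)
    (a b c3 e4 e5 : Int) (t : List Int) (d X Y : Int) :
    (if PySem.Int.mod e4 2 = 0 ∧ d > 0 then pvAUp f (a :: b :: c3 :: e4 :: e5 :: t) d d.toNat X Y
     else if PySem.Int.mod e4 2 ≠ 0 ∧ d > 0 then pvADown f (a :: b :: c3 :: e4 :: e5 :: t) d d.toNat X Y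
     else a :: b :: c3 :: e4 :: e5 :: t)
    =
    match (if d ≤ 0 then (a, b, e4, e5)
           else match pvBStep d.toNat (if PySem.Int.mod e4 2 = 0 then (1:Int) else -1) b d Y with
                | (x1', d'', true) => pvBOuter f a x1' e4 1 d'' X Y
                | (x1', _, false) => (a, x1', e4, e5)) with
    | (y0, y1, y3, y4) => y0 :: y1 :: c3 :: y3 :: y4 :: t := by
  by_cases hd : d ≤ 0
  · have h1 : ¬ (PySem.Int.mod e4 2 = 0 ∧ d > 0) := by rintro ⟨_, h⟩; omega
    have h2 : ¬ (PySem.Int.mod e4 2 ≠ 0 ∧ d > 0) := by rintro ⟨_, h⟩; omega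
    rw [if_neg h1, if_neg h2, if_pos hd]
  · have hdpos : d > 0 := by omega
    have hcast : ((d.toNat : Nat) : Int) = d := Int.toNat_of_nonneg (by omega)
    rw [if_neg hd]
    by_cases hm : PySem.Int.mod e4 2 = 0
    · rw [if_pos ⟨hm, hdpos⟩, if_pos hm]
      have := pvUpEq d.toNat f a b c3 e4 e5 t X Y
      rw [hcast] at this
      rcases hB : pvBStep d.toNat 1 b d Y with ⟨x1', d'', hit⟩
      rw [this, hB]
      cases hit
      · simp
      · simp only [List.set]
        exact ih a x1' c3 e4 1 t d'' X Y
    · have hm' : PySem.Int.mod e4 2 ≠ 0 := hm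
      rw [if_neg (by rintro ⟨h, _⟩; exact hm h), if_pos ⟨hm', hdpos⟩, if_neg hm]
      have := pvDownEq d.toNat f a b c3 e4 e5 t X Y
      rw [hcast] at this
      rcases hB : pvBStep d.toNat (-1) b d Y with ⟨x1', d'', hit⟩
      rw [this, hB]
      cases hit
      · simp
      · simp only [List.set]
        exact ih a x1' c3 e4 1 t d'' X Y

-- edge-block correspondence on a decomposed 5+-element list
theorem pvEdgeEq (a b c3 e4 e5 d Y : Int) (t : List Int) :
    pvAEdge (a :: b :: c3 :: e4 :: e5 :: t) d Y =
      ((pvBEdge a b e4 e5 d Y).1 :: b :: c3 :: (pvBEdge a b e4 e5 d Y).2.1 ::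
        (pvBEdge a b e4 e5 d Y).2.2.1 :: t, (pvBEdge a b e4 e5 d Y).2.2.2) := by
  unfold pvAEdge pvBEdge
  simp only [pysem, List.getD_cons_zero, List.getD_cons_succ]
  by_cases hE : e5 = 1 ∧ d > 0 ∧ (b = Y - 1 ∨ (b = 0 ∧ e4 ≠ 0))
  · obtain ⟨h5, hd, hcase⟩ := hE
    rcases hcase with hb | ⟨hb, h3⟩
    · rw [if_pos ⟨h5, hb, hd⟩, if_pos ⟨h5, hd, Or.inl hb⟩]; simp [List.set]
    · by_cases hb' : b = Y - 1
      · rw [if_pos ⟨h5, hb', hd⟩, if_pos ⟨h5, hd, Or.inl hb'⟩]; simp [List.set]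
      · rw [if_neg (by rintro ⟨_, hy, _⟩; exact hb' hy), if_pos ⟨h5, hb, hd, h3⟩,
            if_pos ⟨h5, hd, Or.inr ⟨hb, h3⟩⟩]
        simp [List.set]
  · have hA1 : ¬ (e5 = 1 ∧ b = Y - 1 ∧ d > 0) := by
      rintro ⟨x, y, z⟩; exact hE ⟨x, z, Or.inl y⟩
    have hA2 : ¬ (e5 = 1 ∧ b = 0 ∧ d > 0 ∧ e4 ≠ 0) := by
      rintro ⟨x, y, z, w⟩; exact hE ⟨x, z, Or.inr ⟨y, w⟩⟩
    rw [if_neg hA1, if_neg hA2, if_neg hE]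

-- main correspondence: A's recursive body equals B's iterative outer loop (same fuel)
theorem pvMainEq (f : Nat) : ∀ (a b c3 e4 e5 : Int) (t : List Int) (d X Y : Int),
    pvAGo f (a :: b :: c3 :: e4 :: e5 :: t) d X Y =
      (match pvBOuter f a b e4 e5 d X Y with
       | (y0, y1, y3, y4) => y0 :: y1 :: c3 :: y3 :: y4 :: t) := by
  induction f with
  | zero => intro a b c3 e4 e5 t d X Y; simp [pvAGo, pvBOuter]
  | succ f ih =>
    intro a b c3 e4 e5 t d X Y
    rw [pvAGo, pvBOuter, pvEdgeEq]
    rcases hq : pvBEdge a b e4 e5 d Y with ⟨q0, q3, q4, qd⟩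
    simp only [PySem.List.pyGetD_ofNat', List.getD_cons_zero, List.getD_cons_succ]
    exact pvTail f ih q0 b c3 q3 q4 t qd X Y

-- ===== VERDICT (by name: the statement is the Claim_ definition above) =====
theorem get_player_location_spec : Claim_equal_get_player_location := by
  intro pl d X Y _ hpre
  unfold Spec_get_player_location get_player_location get_player_location_alt
  match pl, hpre with
  | a :: b :: c3 :: e4 :: e5 :: t, _ =>
    simp only [pysem, List.getD_cons_zero, List.getD_cons_succ, List.set]
    rw [pvMainEq]
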